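-- pv_equiv track=rewrite | github.com/lukyrasocha/ITU | 1_semester/IDSP/assignments/assignment7/pascal.py | search_pascal_multiples_fast
-- ===== SOURCE A (Python) =====
-- from collections import Counter
--
-- def search_pascal_multiples_fast(row_limit):
--     old = [1,4,6] # I decided to start from the 5th row, because it is the first row that will count something (after excluding the first and last 2 elements)
--                   # I also decided to create only half of the triangle, because the other half is 'the mirror' of the first half
--                   # (so eventually I can just multiply the occurence of numbers in one row by 2 (when the number of elements in the row is even))
--                   # and multiply the occurence of numbers in one row by 2 apart from the number in the middle of the row (when the number of elements in the row is odd)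
--     odd = []
--     even = []
--     for i in range(4,row_limit):
--         if i%2 ==0:
--             new = [1,old[1]+1] + [old[i] + old[i+1] for i in range(1,len(old)-1)] # for rows with even number of elemenets
--             even = even + new[2:] # excluding the first two elements
--         else:
--             new = [1,old[1]+1] + [old[i] + old[i+1] for i in range(1,len(old)-1)] + [old[-1]*2] # for rows with odd number of elements
--             odd = odd + new[2:-1] #again exluding the first two elements plus exluding the middle element of a row with odd number of elemenets
--         old = new  #updating to be able to calculate the next row
--     huge = even + odd
--     counter = Counter(huge)
--     final = []
--     for key,value in counter.items():
--         if value*2 > 3: #since I created only half of the triangle I multiply the number of occurence by 2 and check if it appears more than 3 times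
--             final.append(key)
--     final.sort()
--     return final
-- ===== SOURCE B (Python) =====
-- from collections import Counter
--
-- def search_pascal_multiples_fast(row_limit):
--     counter = Counter()
--     for n in range(5, row_limit + 1):
--         c = n * (n - 1) // 2  # comb(n, 2)
--         for k in range(2, n - 1):
--             if not (n % 2 == 0 and k == n // 2):
--                 counter[c] += 1
--             c = c * (n - k) // (k + 1)  # comb(n, k+1)
--     return sorted(v for v, c in counter.items() if c > 3)
-- ===== Notes on version B (the rewrite author's own statement) =====
-- stated objective: alternative
-- what changed: B drops A's half-triangle additive recurrence with its odd/even accumulator lists and doubled half-counts; instead one Counter is filled row by row with closed-form binomial coefficients comb(n,k), maintained by the multiplicative recurrence c = c*(n-k)//(k+1) over the full row interior (skipping the central element of even rows, which A never counts), and the sorted keys occurring at least four times are returned.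
import Mathlib
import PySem

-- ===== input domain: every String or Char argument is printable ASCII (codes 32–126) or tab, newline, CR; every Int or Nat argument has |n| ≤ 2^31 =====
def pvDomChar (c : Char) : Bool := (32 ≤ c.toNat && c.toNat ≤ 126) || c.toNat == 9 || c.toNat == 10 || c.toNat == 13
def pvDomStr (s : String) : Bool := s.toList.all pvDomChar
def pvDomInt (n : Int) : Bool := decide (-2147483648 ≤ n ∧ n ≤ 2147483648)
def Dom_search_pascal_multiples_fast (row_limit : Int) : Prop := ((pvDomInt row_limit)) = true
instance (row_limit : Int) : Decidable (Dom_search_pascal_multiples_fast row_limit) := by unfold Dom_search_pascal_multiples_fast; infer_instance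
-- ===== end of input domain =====

-- B replaces A's half-triangle additive recurrence and separate odd/even accumulator lists
-- by one Counter filled with closed-form binomial coefficients comb(n, k); alternative
-- decomposition (not measured faster).

-- ===== PORT A =====
-- the body of A's 'for i in range(4, row_limit)' loop; state = (old, odd, even)
def pvStepA (st : List Int × List Int × List Int) (i : Int) : List Int × List Int × List Int :=
  let old := st.1
  let odd := st.2.1
  let even := st.2.2
  if PySem.Int.mod i 2 = 0 then
    let new := [1, PySem.List.pyGetD old 1 0 + 1] ++
      (PySem.List.pyRange 1 (PySem.List.len old - 1) 1).map
        (fun j => PySem.List.pyGetD old j 0 + PySem.List.pyGetD old (j + 1) 0)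
    (new, odd, even ++ PySem.List.slice new (some 2) none)
  else
    let new := ([1, PySem.List.pyGetD old 1 0 + 1] ++
      (PySem.List.pyRange 1 (PySem.List.len old - 1) 1).map
        (fun j => PySem.List.pyGetD old j 0 + PySem.List.pyGetD old (j + 1) 0)) ++
      [PySem.List.pyGetD old (-1) 0 * 2]
    (new, odd ++ PySem.List.slice new (some 2) (some (-1)), even)

def search_pascal_multiples_fast (row_limit : Int) : List Int :=
  let st := (PySem.List.pyRange 4 row_limit 1).foldl pvStepA ([1, 4, 6], [], [])
  let huge := st.2.2 ++ st.2.1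
  let counter := PySem.Dict.counter huge
  let final := counter.items.foldl
    (fun acc kv => if kv.2 * 2 > 3 then acc ++ [kv.1] else acc) []
  PySem.List.sorted final id

-- ===== PORT B =====
-- the body of B's 'for n in ...' loop: a running value c = comb(n, k) is kept alongside
-- the Counter; every interior value is counted, skipping the centre of an even row
def pvStepB (c : PySem.Dict Int Int) (n : Int) : PySem.Dict Int Int :=
  ((PySem.List.pyRange 2 (n - 1) 1).foldl
    (fun (st : PySem.Dict Int Int × Int) k =>
      (if ¬ (PySem.Int.mod n 2 = 0 ∧ k = PySem.Int.floordiv n 2)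
          then st.1.modify st.2 0 (· + 1) else st.1,
       PySem.Int.floordiv (st.2 * (n - k)) (k + 1)))
    (c, PySem.Int.floordiv (n * (n - 1)) 2)).1

def search_pascal_multiples_fast_alt (row_limit : Int) : List Int :=
  let counter := (PySem.List.pyRange 5 (row_limit + 1) 1).foldl pvStepB PySem.Dict.empty
  PySem.List.sorted
    ((counter.items.filter (fun kv => kv.2 > 3)).map (fun kv => kv.1)) id

-- ===== PRECONDITION & SPEC =====
def Spec_search_pascal_multiples_fast (row_limit : Int) (out : List Int) : Prop := out = search_pascal_multiples_fast_alt row_limit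
instance (row_limit : Int) (out : List Int) : Decidable (Spec_search_pascal_multiples_fast row_limit out) := by unfold Spec_search_pascal_multiples_fast; infer_instance

-- ===== CLAIM (what is proved, stated in full; the proofs are below) =====
def Claim_equal_search_pascal_multiples_fast : Prop := ∀ (row_limit : Int), Dom_search_pascal_multiples_fast row_limit → Spec_search_pascal_multiples_fast row_limit (search_pascal_multiples_fast row_limit)

-- ===== LEMMAS AND PROOFS =====

-- A's 'old' list after reaching row n: the left half of row n of Pascal's triangle
def pvHrow (n : Nat) : List Int :=
  (List.range' 0 (n / 2 + 1) 1).map (fun k => (n.choose k : Int))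

-- what row N (N ≥ 5) contributes to A's half-count: choose N k for k = 2 .. (N-1)/2
def pvContrib (N : Nat) : List Int :=
  (List.range' 2 ((N - 1) / 2 - 1) 1).map (fun k => (N.choose k : Int))

lemma pv_hrow_getD (n m : Nat) (h : m < n / 2 + 1) :
    (pvHrow n).getD m 0 = (n.choose m : Int) := by
  unfold pvHrow
  rw [List.getD_eq_getElem _ _ (by simpa using h)]
  simp [List.getElem_range']

-- xs[2:-1] on a list with an explicit last element
lemma pv_slice_two_negone (pre : List Int) (x : Int) :
    PySem.List.slice (pre ++ [x]) (some 2) (some (-1)) = pre.drop 2 := by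
  rcases pre with _|⟨a,_|⟨b,t⟩⟩ <;>
    simp [PySem.List.slice, PySem.List.clampIdx]
  rw [if_neg (by omega),
     show ((↑t.length + 1 + 1 : Int)).toNat - 2 = t.length by omega,
     List.take_append_of_le_length (by omega), List.take_length]

-- the common prefix computed by A's loop body from old = pvHrow n
lemma pv_new_eq (n : Nat) (hn : 4 ≤ n) :
    [1, PySem.List.pyGetD (pvHrow n) 1 0 + 1] ++
      (PySem.List.pyRange 1 (PySem.List.len (pvHrow n) - 1) 1).map
        (fun j => PySem.List.pyGetD (pvHrow n) j 0 + PySem.List.pyGetD (pvHrow n) (j + 1) 0)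
    = (List.range' 0 (n / 2 + 1) 1).map (fun k => ((n + 1).choose k : Int)) := by
  have hlen : PySem.List.len (pvHrow n) - 1 = ((n / 2 : Nat) : Int) := by
    simp [pvHrow, PySem.List.len_eq]
  rw [hlen, PySem.List.pyRange_one]
  have h2 : (((n / 2 : Nat) : Int) - 1).toNat = n / 2 - 1 := by omega
  rw [h2]
  have hsplit : List.range' 0 (n / 2 + 1) 1 = 0 :: 1 :: List.range' 2 (n / 2 - 1) 1 := by
    rw [show n / 2 + 1 = (n / 2 - 1) + 1 + 1 by omega, List.range'_succ, List.range'_succ]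
  rw [hsplit]
  simp only [List.map_cons, Nat.choose_zero_right, Nat.choose_one_right,
    List.range'_eq_map_range, List.map_map, List.cons_append, List.nil_append, Nat.cast_one]
  have hget1 : PySem.List.pyGetD (pvHrow n) 1 0 = (n.choose 1 : Int) := by
    rw [show (1 : Int) = ((1 : Nat) : Int) by norm_num, PySem.List.pyGetD_natCast]
    exact pv_hrow_getD n 1 (by omega)
  rw [hget1, Nat.choose_one_right]
  rw [show ((n:Int) + 1) = 1 + (n:Int) by ring]
  rw [show ((n + 1 : Nat) : Int) = 1 + (n:Int) by push_cast; ring]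
  congr 1
  congr 1
  apply List.map_congr_left
  intro t ht
  have ht' : t < n / 2 - 1 := List.mem_range.mp ht
  simp only [Function.comp_apply]
  have e1 : (1 : Int) + (t : Int) = ((1 + t : Nat) : Int) := by push_cast; ring
  rw [e1]
  rw [show ((1 + t : Nat) : Int) + 1 = ((2 + t : Nat) : Int) by push_cast; ring]
  rw [PySem.List.pyGetD_natCast, PySem.List.pyGetD_natCast,
    pv_hrow_getD n (1 + t) (by omega), pv_hrow_getD n (2 + t) (by omega)]
  rw [show (2 : Nat) + t = (1 + t) + 1 by ring]
  rw [Nat.choose_succ_succ' n (1 + t)]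
  push_cast; ring

lemma pv_drop_two_pre (n : Nat) :
    ((List.range' 0 (n / 2 + 1) 1).map (fun k => ((n + 1).choose k : Int))).drop 2
      = pvContrib (n + 1) := by
  rw [← List.map_drop, List.drop_range']
  unfold pvContrib
  norm_num
  congr 2

lemma pv_stepA_even (n : Nat) (hn : 4 ≤ n) (hpar : n % 2 = 0) (odd even : List Int) :
    pvStepA (pvHrow n, odd, even) (n : Int)
      = (pvHrow (n + 1), odd, even ++ pvContrib (n + 1)) := by
  have hmod : PySem.Int.mod (n : Int) 2 = 0 := by
    rw [show (2:Int) = ((2:Nat):Int) by norm_num, PySem.Int.mod_natCast, hpar]; rfl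
  unfold pvStepA
  rw [if_pos hmod]
  simp only []
  rw [pv_new_eq n hn]
  have hh : pvHrow (n + 1) = (List.range' 0 (n / 2 + 1) 1).map (fun k => ((n + 1).choose k : Int)) := by
    unfold pvHrow
    rw [show (n + 1) / 2 = n / 2 by omega]
  rw [show ((2:Int)) = ((2:Nat):Int) by norm_num, PySem.List.slice_from_natCast]
  rw [pv_drop_two_pre n, hh]

lemma pv_stepA_odd (n : Nat) (hn : 4 ≤ n) (hpar : n % 2 = 1) (odd even : List Int) :
    pvStepA (pvHrow n, odd, even) (n : Int)
      = (pvHrow (n + 1), odd ++ pvContrib (n + 1), even) := by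
  have hmod : PySem.Int.mod (n : Int) 2 = 1 := by
    rw [show (2:Int) = ((2:Nat):Int) by norm_num, PySem.Int.mod_natCast, hpar]; rfl
  unfold pvStepA
  rw [if_neg (by rw [hmod]; norm_num)]
  simp only []
  rw [pv_new_eq n hn]
  have hlast : PySem.List.pyGetD (pvHrow n) (-1) 0 = (n.choose (n / 2) : Int) := by
    unfold pvHrow
    rw [List.range'_concat, List.map_append, List.map_singleton]
    rw [PySem.List.pyGetD_neg_one_append_singleton]
    norm_num
  rw [hlast]
  have hx : (n.choose (n / 2) : Int) * 2 = (((n+1).choose (n / 2 + 1) : Nat) : Int) := by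
    have h1 := Nat.choose_succ_succ' n (n / 2)
    have h2 : n.choose (n / 2 + 1) = n.choose (n / 2) := by
      have := Nat.choose_symm_half (n / 2)
      rw [show 2 * (n / 2) + 1 = n by omega] at this
      exact this
    rw [h1, h2]; push_cast; ring
  rw [hx]
  have hh : pvHrow (n + 1)
      = (List.range' 0 (n / 2 + 1) 1).map (fun k => ((n + 1).choose k : Int)) ++
        [(((n+1).choose (n / 2 + 1) : Nat) : Int)] := by
    unfold pvHrow
    rw [show (n + 1) / 2 + 1 = (n / 2 + 1) + 1 by omega, List.range'_concat, List.map_append]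
    norm_num
  rw [pv_slice_two_negone, pv_drop_two_pre n, hh]

lemma pv_hrow_four : pvHrow 4 = [1, 4, 6] := by decide

-- A's whole loop: old = half row; the two accumulators together hold (as a multiset)
-- the per-row half contributions of rows 5 .. 4+m
lemma pv_A_fold (m : Nat) :
    ∃ odd even : List Int,
      ((List.range m).map (fun (t : Nat) => ((4 : Int) + (t : Int)))).foldl pvStepA ([1, 4, 6], [], [])
        = (pvHrow (4 + m), odd, even) ∧
      (even ++ odd).Perm ((List.range m).flatMap (fun t => pvContrib (5 + t))) := by
  induction m with
  | zero => exact ⟨[], [], by simp [pv_hrow_four], by simp⟩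
  | succ m ih =>
    obtain ⟨odd, even, heq, hperm⟩ := ih
    rw [List.range_succ, List.map_append, List.foldl_append, heq]
    simp only [List.map_singleton, List.foldl_cons, List.foldl_nil]
    have hc : ((4 : Int) + (m : Int)) = ((4 + m : Nat) : Int) := by push_cast; ring
    rw [hc]
    rcases Nat.even_or_odd (4 + m) with hpar | hpar
    · refine ⟨odd, even ++ pvContrib (4 + m + 1), ?_, ?_⟩
      · rw [pv_stepA_even (4 + m) (by omega) (Nat.even_iff.mp hpar) odd even]
        rfl
      · rw [List.flatMap_append]
        simp only [List.flatMap_cons, List.flatMap_nil, List.append_nil]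
        have hsw : (even ++ pvContrib (4 + m + 1) ++ odd).Perm
            ((even ++ odd) ++ pvContrib (4 + m + 1)) := by
          rw [List.append_assoc, List.append_assoc]
          exact List.Perm.append_left even List.perm_append_comm
        exact hsw.trans ((hperm.append_right _).trans
          (by rw [show 5 + m = 4 + m + 1 by omega]))
    · refine ⟨odd ++ pvContrib (4 + m + 1), even, ?_, ?_⟩
      · rw [pv_stepA_odd (4 + m) (by omega) (Nat.odd_iff.mp hpar) odd even]
        rfl
      · rw [List.flatMap_append]
        simp only [List.flatMap_cons, List.flatMap_nil, List.append_nil]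
        rw [← List.append_assoc]
        exact (hperm.append_right _).trans (by rw [show 5 + m = 4 + m + 1 by omega])

-- reflected half: choose N is symmetric
lemma pv_choose_mirror (N a L : Nat) (h : a + L ≤ N + 1) :
    (List.range' (N + 1 - a - L) L 1).map (fun k => (N.choose k : Int))
      = ((List.range' a L 1).map (fun k => (N.choose k : Int))).reverse := by
  apply List.ext_getElem
  · simp
  intro i h1 h2
  simp only [List.getElem_map, List.getElem_reverse, List.length_map, List.length_range',
    List.getElem_range', one_mul]
  congr 1
  have hi : i < L := by simpa using h1
  have hle : a + (L - 1 - i) ≤ N := by omega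
  have hs := Nat.choose_symm hle
  have he : N - (a + (L - 1 - i)) = N + 1 - a - L + i := by omega
  rw [he] at hs
  rw [hs]

-- the values B counts for row N, as natural-number binomial coefficients
def pvValsB (N : Nat) : List Int :=
  ((List.range' 2 (N - 3) 1).filter (fun k => decide (¬ (N % 2 = 0 ∧ k = N / 2)))).map
    (fun k => (N.choose k : Int))

lemma pv_cond_bridge (N a : Nat) :
    (¬ (PySem.Int.mod (N : Int) 2 = 0 ∧ (a : Int) = PySem.Int.floordiv (N : Int) 2))
      ↔ ¬ (N % 2 = 0 ∧ a = N / 2) := by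
  rw [show (2:Int) = ((2:Nat):Int) by norm_num, PySem.Int.mod_natCast, PySem.Int.floordiv_natCast]
  constructor
  · rintro hnot ⟨h1, h2⟩
    exact hnot ⟨by exact_mod_cast h1, by exact_mod_cast h2⟩
  · rintro hnot ⟨h1, h2⟩
    exact hnot ⟨by exact_mod_cast h1, by exact_mod_cast h2⟩

lemma pv_inner (N : Nat) : ∀ (L a : Nat) (d : PySem.Dict Int Int), 2 ≤ a → a + L ≤ N →
    ((List.range' a L 1).map (fun k : Nat => (k : Int))).foldl
      (fun (st : PySem.Dict Int Int × Int) k =>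
        (if ¬ (PySem.Int.mod (N:Int) 2 = 0 ∧ k = PySem.Int.floordiv (N:Int) 2)
            then st.1.modify st.2 0 (· + 1) else st.1,
         PySem.Int.floordiv (st.2 * ((N:Int) - k)) (k + 1)))
      (d, (N.choose a : Int))
    = ((((List.range' a L 1).filter (fun k => decide (¬ (N % 2 = 0 ∧ k = N / 2)))).map
          (fun k => (N.choose k : Int))).foldl (fun c v => c.modify v 0 (· + 1)) d,
       (N.choose (a + L) : Int)) := by
  intro L
  induction L with
  | zero => intro a d _ _; simp
  | succ L ih =>
    intro a d ha haL
    rw [List.range'_succ, List.map_cons, List.foldl_cons, List.filter_cons]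
    have hstep : PySem.Int.floordiv ((N.choose a : Int) * ((N:Int) - (a:Int))) ((a:Int) + 1)
        = (N.choose (a + 1) : Int) := by
      rw [show ((N:Int) - (a:Int)) = ((N - a : Nat) : Int) by push_cast [Nat.cast_sub (by omega : a ≤ N)]; ring]
      rw [show ((N.choose a : Int) * ((N - a : Nat) : Int)) = ((N.choose a * (N - a) : Nat) : Int) by push_cast; ring]
      rw [show ((a:Int) + 1) = ((a + 1 : Nat) : Int) by push_cast; ring]
      rw [PySem.Int.floordiv_natCast]
      congr 1
      rw [← Nat.choose_succ_right_eq, Nat.mul_div_cancel _ (by omega)]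
    by_cases hc : N % 2 = 0 ∧ a = N / 2
    · rw [if_neg (by rw [pv_cond_bridge]; exact not_not_intro hc),
          if_neg (by simp only [decide_eq_true_eq]; exact not_not_intro hc)]
      simp only []
      rw [hstep, ih (a+1) d (by omega) (by omega),
          show a + 1 + L = a + (L + 1) from by omega]
    · rw [if_pos ((pv_cond_bridge N a).mpr hc),
          if_pos (by simp only [decide_eq_true_eq]; exact hc)]
      simp only []
      rw [hstep, ih (a+1) _ (by omega) (by omega),
          show a + 1 + L = a + (L + 1) from by omega]
      rw [List.map_cons, List.foldl_cons]

lemma pv_stepB_eq (c : PySem.Dict Int Int) (N : Nat) (h : 5 ≤ N) :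
    pvStepB c (N : Int) = (pvValsB N).foldl (fun c v => c.modify v 0 (· + 1)) c := by
  unfold pvStepB
  have hinit : PySem.Int.floordiv ((N:Int) * ((N:Int) - 1)) 2 = (N.choose 2 : Int) := by
    rw [show ((N:Int) * ((N:Int) - 1)) = ((N * (N - 1) : Nat) : Int) by
          push_cast [Nat.cast_sub (by omega : 1 ≤ N)]; ring]
    rw [show (2:Int) = ((2:Nat):Int) by norm_num, PySem.Int.floordiv_natCast,
        ← Nat.choose_two_right]
  have hrange : PySem.List.pyRange 2 ((N:Int) - 1) 1
      = (List.range' 2 (N - 3) 1).map (fun k : Nat => (k : Int)) := by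
    rw [PySem.List.pyRange_one, show (((N:Int) - 1) - 2).toNat = N - 3 by omega,
        List.range'_eq_map_range, List.map_map]
    apply List.map_congr_left
    intro t _
    simp only [Function.comp_apply]
    push_cast; ring
  rw [hinit, hrange, pv_inner N (N - 3) 2 c (by omega) (by omega)]
  rfl

-- B's per-row counted values: each half value exactly twice
lemma pv_valsB_perm (N : Nat) (h : 5 ≤ N) :
    (pvValsB N).Perm (pvContrib N ++ pvContrib N) := by
  unfold pvValsB
  rcases Nat.even_or_odd N with hpar | hpar
  · -- N even: the filter removes exactly the central k = N/2
    have hN2 : N % 2 = 0 := Nat.even_iff.mp hpar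
    set L := N / 2 - 2 with hL
    have hsplit : List.range' 2 (N-3) 1
        = List.range' 2 L 1 ++ (2+L) :: List.range' (3+L) L 1 := by
      rw [show N - 3 = L + (1 + L) by omega, ← List.range'_append (s := 2) (m := L) (n := 1 + L) (step := 1)]
      congr 1
      rw [show 2 + 1 * L = 2 + L by omega, show 1 + L = L + 1 by omega, List.range'_succ]
      congr 1
      congr 1
      omega
    rw [hsplit, List.filter_append, List.filter_cons]
    have hc : (decide (¬ (N % 2 = 0 ∧ 2 + L = N / 2))) = false := by
      simp only [decide_eq_false_iff_not, not_not]
      exact ⟨hN2, by omega⟩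
    rw [hc]
    simp only [Bool.false_eq_true, ite_false]
    have hf1 : (List.range' 2 L 1).filter (fun k : Nat => decide (¬ (N % 2 = 0 ∧ k = N / 2)))
        = List.range' 2 L 1 := by
      apply List.filter_eq_self.mpr
      intro k hk
      have := List.mem_range'_1.mp hk
      simp only [decide_eq_true_eq]
      rintro ⟨_, h2⟩; omega
    have hf2 : (List.range' (3+L) L 1).filter (fun k : Nat => decide (¬ (N % 2 = 0 ∧ k = N / 2)))
        = List.range' (3+L) L 1 := by
      apply List.filter_eq_self.mpr
      intro k hk
      have := List.mem_range'_1.mp hk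
      simp only [decide_eq_true_eq]
      rintro ⟨_, h2⟩; omega
    rw [hf1, hf2, List.map_append]
    have hmir : (List.range' (3+L) L 1).map (fun k : Nat => (N.choose k : Int))
        = ((List.range' 2 L 1).map (fun k : Nat => (N.choose k : Int))).reverse := by
      have := pv_choose_mirror N 2 L (by omega)
      rw [show N + 1 - 2 - L = 3 + L by omega] at this
      exact this
    rw [hmir]
    have hcon : pvContrib N = (List.range' 2 L 1).map (fun k : Nat => (N.choose k : Int)) := by
      unfold pvContrib
      rw [show (N - 1) / 2 - 1 = L by omega]
    rw [hcon]
    exact List.Perm.append_left _ (List.reverse_perm _)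
  · -- N odd: the filter keeps everything
    have hN2 : N % 2 = 1 := Nat.odd_iff.mp hpar
    set L := (N - 3) / 2 with hL
    have hf : (List.range' 2 (N-3) 1).filter (fun k : Nat => decide (¬ (N % 2 = 0 ∧ k = N / 2)))
        = List.range' 2 (N-3) 1 := by
      apply List.filter_eq_self.mpr
      intro k _
      simp only [decide_eq_true_eq]
      rintro ⟨h1, _⟩; omega
    rw [hf]
    have hsplit : List.range' 2 (N-3) 1 = List.range' 2 L 1 ++ List.range' (2+L) L 1 := by
      rw [show N - 3 = L + L by omega, ← List.range'_append (s := 2) (m := L) (n := L) (step := 1)]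
      congr 1
      congr 1
      omega
    rw [hsplit, List.map_append]
    have hmir : (List.range' (2+L) L 1).map (fun k : Nat => (N.choose k : Int))
        = ((List.range' 2 L 1).map (fun k : Nat => (N.choose k : Int))).reverse := by
      have := pv_choose_mirror N 2 L (by omega)
      rw [show N + 1 - 2 - L = 2 + L by omega] at this
      exact this
    rw [hmir]
    have hcon : pvContrib N = (List.range' 2 L 1).map (fun k : Nat => (N.choose k : Int)) := by
      unfold pvContrib
      rw [show (N - 1) / 2 - 1 = L by omega]
    rw [hcon]
    exact List.Perm.append_left _ (List.reverse_perm _)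

-- B's whole loop builds Counter(LB) for the flattened list LB of counted values
lemma pv_B_fold (m : Nat) :
    ((List.range m).map (fun t : Nat => ((5 + t : Nat) : Int))).foldl pvStepB PySem.Dict.empty
      = PySem.Dict.counter ((List.range m).flatMap (fun t => pvValsB (5 + t))) := by
  rw [PySem.Dict.counter_eq_foldl, List.foldl_flatMap, List.foldl_map]
  apply PySem.List.foldl_congr_mem
  intro acc t _
  exact pv_stepB_eq acc (5 + t) (by omega)

lemma pv_flatMap_double {l : List Nat} {f g : Nat → List Int}
    (h : ∀ x ∈ l, (f x).Perm (g x ++ g x)) :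
    (l.flatMap f).Perm (l.flatMap g ++ l.flatMap g) := by
  induction l with
  | nil => simp
  | cons x xs ih =>
    simp only [List.flatMap_cons]
    have h1 : (f x ++ xs.flatMap f).Perm ((g x ++ g x) ++ (xs.flatMap g ++ xs.flatMap g)) :=
      (h x (by simp)).append (ih (fun y hy => h y (by simp [hy])))
    refine h1.trans ?_
    simp only [← List.append_assoc]
    refine List.Perm.append_right _ ?_
    simp only [List.append_assoc]
    exact List.Perm.append_left _ List.perm_append_comm

-- sorting two nodup lists with the same members gives the same list
lemma pv_sorted_ext (l₁ l₂ : List Int) (h₁ : l₁.Nodup) (h₂ : l₂.Nodup)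
    (hm : ∀ v, v ∈ l₁ ↔ v ∈ l₂) :
    PySem.List.sorted l₁ id = PySem.List.sorted l₂ id := by
  have hperm : l₁.Perm l₂ := (List.perm_ext_iff_of_nodup h₁ h₂).mpr hm
  apply PySem.List.sorted_eq_of_perm_of_pairwise_lt
  · exact ((PySem.List.sorted_perm l₂ id false).trans hperm.symm)
  · have hp := PySem.List.sorted_pairwise l₂ id
    have hnd : (PySem.List.sorted l₂ id).Nodup :=
      (PySem.List.sorted_perm l₂ id false).nodup_iff.mpr h₂
    exact hp.imp₂ (fun a b hle hne => lt_of_le_of_ne hle hne) hnd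

-- ===== VERDICT (by name: the statement is the Claim_ definition above) =====
theorem search_pascal_multiples_fast_spec : Claim_equal_search_pascal_multiples_fast := by
  intro row_limit _
  unfold Spec_search_pascal_multiples_fast
  unfold search_pascal_multiples_fast search_pascal_multiples_fast_alt
  -- both loops run the same number m of steps
  set m := (row_limit - 4).toNat with hm
  -- A side: normalise the fold
  have hrangeA : PySem.List.pyRange 4 row_limit 1
      = (List.range m).map (fun t : Nat => ((4 : Int) + (t : Int))) := by
    rw [PySem.List.pyRange_one, hm]
  obtain ⟨odd, even, heq, hperm⟩ := pv_A_fold m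
  rw [hrangeA, heq]
  -- B side: normalise the fold
  have hrangeB : PySem.List.pyRange 5 (row_limit + 1) 1
      = (List.range m).map (fun t : Nat => ((5 + t : Nat) : Int)) := by
    rw [PySem.List.pyRange_one, show (row_limit + 1 - 5).toNat = m by omega]
    apply List.map_congr_left
    intro t _
    push_cast; ring
  rw [hrangeB, pv_B_fold m]
  set HA := (List.range m).flatMap (fun t => pvContrib (5 + t)) with hHA
  set LB := (List.range m).flatMap (fun t => pvValsB (5 + t)) with hLBdef
  -- the multiset relations
  have hLB : LB.Perm (HA ++ HA) :=
    pv_flatMap_double (fun t _ => pv_valsB_perm (5 + t) (by omega))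
  have hcnt : ∀ v : Int, LB.count v = HA.count v + HA.count v := by
    intro v
    rw [hLB.count_eq, List.count_append]
  have hcntA : ∀ v : Int, (even ++ odd).count v = HA.count v := fun v => hperm.count_eq v
  have hmemA : ∀ v : Int, v ∈ (even ++ odd) ↔ v ∈ HA := fun v => hperm.mem_iff
  have hmemB : ∀ v : Int, v ∈ LB ↔ v ∈ HA := by
    intro v
    rw [hLB.mem_iff, List.mem_append, or_self]
  -- A's final list before sorting
  have hA : ((PySem.Dict.counter (even ++ odd)).items.foldl
        (fun acc kv => if kv.2 * 2 > 3 then acc ++ [kv.1] else acc) ([] : List Int))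
      = (PySem.Set.ofList (even ++ odd)).filter
          (fun k => decide (((even ++ odd).count k : Int) * 2 > 3)) := by
    rw [PySem.List.foldl_append_ite (fun kv : Int × Int => kv.2 * 2 > 3) Prod.fst]
    rw [PySem.Dict.items_counter, List.filter_map, List.map_map, List.nil_append]
    simp [Function.comp_def]
  -- B's final list before sorting
  have hB : (((PySem.Dict.counter LB).items.filter (fun kv => kv.2 > 3)).map (fun kv => kv.1))
      = (PySem.Set.ofList LB).filter
          (fun k => decide ((LB.count k : Int) > 3)) := by
    rw [PySem.Dict.items_counter, List.filter_map, List.map_map]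
    simp [Function.comp_def]
  simp only [hA, hB]
  -- same members, both nodup, so the two sorted lists coincide
  apply pv_sorted_ext
  · exact (PySem.Set.nodup_ofList (even ++ odd)).filter _
  · exact (PySem.Set.nodup_ofList LB).filter _
  intro v
  simp only [List.mem_filter, PySem.Set.mem_ofList, decide_eq_true_eq]
  constructor
  · rintro ⟨hv, hc⟩
    refine ⟨(hmemB v).mpr ((hmemA v).mp hv), ?_⟩
    rw [hcnt v]
    rw [hcntA v] at hc
    push_cast at hc ⊢
    omega
  · rintro ⟨hv, hc⟩
    refine ⟨(hmemA v).mpr ((hmemB v).mp hv), ?_⟩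
    rw [hcnt v] at hc
    rw [hcntA v]
    push_cast at hc ⊢
    omega
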